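-- pv_equiv track=rewrite | github.com/dainiergonzalezromero/WiFi-QoS-NS3 | SDWN/02_concatenate_results.py | assign_priorities
-- ===== SOURCE A (Python) =====
-- def assign_priorities(df, nStaH, nStaM, nStaL):
--     """
--     Asigna prioridades a los dispositivos según la distribución.
--     """
--     priority_list = []
--     for i in range(len(df)):
--         if i < nStaH:
--             priority_list.append("HIGH")
--         elif i < nStaH + nStaM:
--             priority_list.append("MEDIUM")
--         elif i < nStaH + nStaM + nStaL:
--             priority_list.append("LOW")
--         else:
--             priority_list.append("NRT")
--
--     return priority_list
-- ===== SOURCE B (Python) =====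
-- def assign_priorities(df, nStaH, nStaM, nStaL):
--     """Same labels, built as four blocks from clamped cumulative boundaries."""
--     n = len(df)
--     e1 = min(max(nStaH, 0), n)
--     e2 = min(max(nStaH + nStaM, e1), n)
--     e3 = min(max(nStaH + nStaM + nStaL, e2), n)
--     return ["HIGH"] * e1 + ["MEDIUM"] * (e2 - e1) + ["LOW"] * (e3 - e2) + ["NRT"] * (n - e3)
-- ===== Notes on version B (the rewrite author's own statement) =====
-- stated objective: simpler
-- what changed: B replaces the per-index loop with nested branch tests by computing three clamped cumulative boundaries and concatenating four constant replicated blocks.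
import Mathlib
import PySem

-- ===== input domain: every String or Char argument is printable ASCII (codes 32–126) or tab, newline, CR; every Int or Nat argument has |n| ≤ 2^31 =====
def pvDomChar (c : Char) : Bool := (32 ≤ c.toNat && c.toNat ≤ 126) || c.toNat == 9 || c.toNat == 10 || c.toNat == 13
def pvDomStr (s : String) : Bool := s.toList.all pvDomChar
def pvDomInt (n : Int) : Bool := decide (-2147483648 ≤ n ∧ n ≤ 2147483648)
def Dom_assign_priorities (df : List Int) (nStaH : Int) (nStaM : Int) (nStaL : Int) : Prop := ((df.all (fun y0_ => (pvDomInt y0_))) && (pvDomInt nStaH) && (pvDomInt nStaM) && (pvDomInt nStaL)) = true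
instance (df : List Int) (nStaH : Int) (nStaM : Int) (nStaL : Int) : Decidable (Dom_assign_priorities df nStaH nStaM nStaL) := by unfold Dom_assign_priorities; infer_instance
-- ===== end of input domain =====

-- B builds the answer as four constant blocks from clamped cumulative boundaries instead of testing every index (objective: simpler).

-- ===== PORT A =====
-- literal port: loop over range(len(df)), append one label per index via the nested branches
def assign_priorities (df : List Int) (nStaH : Int) (nStaM : Int) (nStaL : Int) : List String :=
  (PySem.List.pyRange 0 (df.length : Int) 1).foldl
    (fun priority_list i =>
      if i < nStaH then priority_list ++ ["HIGH"]
      else if i < nStaH + nStaM then priority_list ++ ["MEDIUM"]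
      else if i < nStaH + nStaM + nStaL then priority_list ++ ["LOW"]
      else priority_list ++ ["NRT"]) []

-- ===== PORT B =====
-- literal port of Source B: clamped cumulative boundaries, then four replicated blocks
def assign_priorities_alt (df : List Int) (nStaH : Int) (nStaM : Int) (nStaL : Int) : List String :=
  let n : Int := df.length
  let e1 : Int := min (max nStaH 0) n
  let e2 : Int := min (max (nStaH + nStaM) e1) n
  let e3 : Int := min (max (nStaH + nStaM + nStaL) e2) n
  List.replicate e1.toNat "HIGH" ++ List.replicate (e2 - e1).toNat "MEDIUM"
    ++ List.replicate (e3 - e2).toNat "LOW" ++ List.replicate (n - e3).toNat "NRT"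

-- ===== PRECONDITION & SPEC =====
def Spec_assign_priorities (df : List Int) (nStaH : Int) (nStaM : Int) (nStaL : Int) (out : List String) : Prop := out = assign_priorities_alt df nStaH nStaM nStaL
instance (df : List Int) (nStaH : Int) (nStaM : Int) (nStaL : Int) (out : List String) : Decidable (Spec_assign_priorities df nStaH nStaM nStaL out) := by unfold Spec_assign_priorities; infer_instance

-- ===== CLAIM (what is proved, stated in full; the proofs are below) =====
def Claim_equal_assign_priorities : Prop := ∀ (df : List Int) (nStaH : Int) (nStaM : Int) (nStaL : Int), Dom_assign_priorities df nStaH nStaM nStaL → Spec_assign_priorities df nStaH nStaM nStaL (assign_priorities df nStaH nStaM nStaL)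

-- ===== LEMMAS AND PROOFS =====

theorem map_eq_replicate_of_forall {α β : Type} (l : List α) (f : α → β) (c : β)
    (h : ∀ x ∈ l, f x = c) : l.map f = List.replicate l.length c := by
  induction l with
  | nil => rfl
  | cons a t ih =>
    simp only [List.map_cons, List.length_cons, List.replicate_succ]
    rw [h a (List.mem_cons_self), ih (fun x hx => h x (List.mem_cons_of_mem a hx))]

-- map of A's branch body over a range whose members all take the same branch is a constant block
theorem map_branch_seg (a b s1 s2 s3 : Int) (c : String)
    (h : ∀ i : Int, a ≤ i → i < b →
      (if i < s1 then "HIGH" else if i < s2 then "MEDIUM" else if i < s3 then "LOW" else "NRT") = c) :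
    (PySem.List.pyRange a b 1).map
      (fun i => if i < s1 then "HIGH" else if i < s2 then "MEDIUM" else if i < s3 then "LOW" else "NRT")
      = List.replicate (b - a).toNat c := by
  rw [map_eq_replicate_of_forall _ _ c, PySem.List.length_pyRange_one]
  intro x hx
  rw [PySem.List.mem_pyRange_one] at hx
  exact h x hx.1 hx.2

-- ===== VERDICT (by name: the statement is the Claim_ definition above) =====
theorem assign_priorities_spec : Claim_equal_assign_priorities := by
  intro df nStaH nStaM nStaL _
  unfold Spec_assign_priorities assign_priorities assign_priorities_alt
  set n : Int := (df.length : Int) with hn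
  have hn0 : 0 ≤ n := by positivity
  set e1 : Int := min (max nStaH 0) n with he1
  set e2 : Int := min (max (nStaH + nStaM) e1) n with he2
  set e3 : Int := min (max (nStaH + nStaM + nStaL) e2) n with he3
  have h01 : (0:Int) ≤ e1 := by omega
  have h12 : e1 ≤ e2 := by omega
  have h23 : e2 ≤ e3 := by omega
  have h3n : e3 ≤ n := by omega
  have hfun : (fun (priority_list : List String) (i : Int) =>
      if i < nStaH then priority_list ++ ["HIGH"]
      else if i < nStaH + nStaM then priority_list ++ ["MEDIUM"]
      else if i < nStaH + nStaM + nStaL then priority_list ++ ["LOW"]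
      else priority_list ++ ["NRT"])
      = (fun (acc : List String) (i : Int) =>
          acc ++ [if i < nStaH then "HIGH" else if i < nStaH + nStaM then "MEDIUM"
                  else if i < nStaH + nStaM + nStaL then "LOW" else "NRT"]) := by
    funext acc i; split_ifs <;> rfl
  rw [hfun, PySem.List.foldl_append_singleton_eq_map, List.nil_append,
        PySem.List.pyRange_one_append 0 e1 n h01 (by omega),
        PySem.List.pyRange_one_append e1 e2 n h12 (by omega),
        PySem.List.pyRange_one_append e2 e3 n h23 h3n,
        List.map_append, List.map_append, List.map_append,
        map_branch_seg 0 e1 _ _ _ "HIGH" (by intro i h1 h2; rw [if_pos (by omega)]),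
        map_branch_seg e1 e2 _ _ _ "MEDIUM" (by intro i h1 h2; rw [if_neg (by omega), if_pos (by omega)]),
        map_branch_seg e2 e3 _ _ _ "LOW" (by intro i h1 h2; rw [if_neg (by omega), if_neg (by omega), if_pos (by omega)]),
        map_branch_seg e3 n _ _ _ "NRT" (by intro i h1 h2; rw [if_neg (by omega), if_neg (by omega), if_neg (by omega)])]
  simp only [Int.sub_zero, List.append_assoc]
  rfl
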